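-- pv_equiv track=rewrite | github.com/hyeona04/aiproject_level0 | level0/caesar_menu_beginner.py | encrypt_double
-- ===== SOURCE A (Python) =====
-- ALPHABET = "abcdefghijklmnopqrstuvwxyz"
--
-- ALPHABET_UP = ALPHABET.upper()
--
-- def make_shifted_alphabet(shift: int):
--     """
--     1차: 시저 우측 shift 적용된 대문자 알파벳열 생성
--     예) shift=3 → D E F ... Z A B C
--     """
--     return [ALPHABET_UP[(i + shift) % 26] for i in range(26)]
--
-- def encrypt_stage1(msg: str, shift: int) -> str:
--     """1차: 시저(+shift) → 대문자"""
--     out = []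
--     for ch in msg:
--         if ch == " ":
--             out.append(" ")
--         else:
--             i = ALPHABET.index(ch.lower())
--             out.append(ALPHABET_UP[(i + shift) % 26])
--     return "".join(out)
--
-- def make_stage2_maps(shift: int):
--     """
--     2차 치환용 매핑(딕셔너리) 준비
--     shifted[i] → reversed_shifted[i] (정방향)
--     reversed_shifted[i] → shifted[i] (역방향)
--     """
--     shifted = make_shifted_alphabet(shift)
--     reversed_shifted = list(reversed(shifted))
--     forward = {shifted[i]: reversed_shifted[i] for i in range(26)}
--     backward = {reversed_shifted[i]: shifted[i] for i in range(26)}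
--     return forward, backward
--
-- def encrypt_double(msg: str, shift: int = 3) -> str:
--     """최종 암호화: 1차 시저 → 2차 역순치환"""
--     ct1 = encrypt_stage1(msg, shift)
--     forward, _ = make_stage2_maps(shift)
--     out = []
--     for ch in ct1:
--         if ch == " ":
--             out.append(" ")
--         else:
--             out.append(forward[ch])
--     return "".join(out)
-- ===== SOURCE B (Python) =====
-- ALPHABET = "abcdefghijklmnopqrstuvwxyz"
--
-- ALPHABET_UP = ALPHABET.upper()
--
-- def encrypt_double(msg: str, shift: int = 3) -> str:
--     """Single pass: Caesar(+shift) then reversal collapse to one closed-form map."""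
--     out = []
--     for ch in msg:
--         if ch == " ":
--             out.append(" ")
--         else:
--             i = ALPHABET.index(ch.lower())
--             out.append(ALPHABET_UP[(25 - i + shift) % 26])
--     return "".join(out)
-- ===== Notes on version B (the rewrite author's own statement) =====
-- stated objective: simpler
-- what changed: B collapses A's two-stage pipeline (build a shifted alphabet, build a forward substitution dict, encrypt in two passes) into one pass that maps each letter of index i directly to ALPHABET_UP[(25 - i + shift) % 26], with no tables and no intermediate ciphertext.
import Mathlib
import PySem

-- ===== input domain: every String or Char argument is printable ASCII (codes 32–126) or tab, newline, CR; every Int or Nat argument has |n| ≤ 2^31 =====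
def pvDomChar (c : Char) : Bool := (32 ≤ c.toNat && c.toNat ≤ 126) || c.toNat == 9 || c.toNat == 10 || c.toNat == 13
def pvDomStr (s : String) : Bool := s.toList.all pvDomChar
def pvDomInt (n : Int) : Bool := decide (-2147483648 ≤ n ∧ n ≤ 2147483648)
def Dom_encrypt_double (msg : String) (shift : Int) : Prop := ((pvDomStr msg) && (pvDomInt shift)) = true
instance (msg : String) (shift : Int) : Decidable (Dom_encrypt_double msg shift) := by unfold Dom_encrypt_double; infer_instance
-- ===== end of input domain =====

-- B collapses A's two-stage cipher (shifted alphabet + reversal dict, two passes) into one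
-- closed-form pass: letter of index i ↦ ALPHABET_UP[(25 - i + shift) % 26].

-- ===== PORT A =====
def pvALPHABET : List Char := "abcdefghijklmnopqrstuvwxyz".toList
def pvALPHABET_UP : List Char := PySem.Chars.upper pvALPHABET

def make_shifted_alphabet (shift : Int) : List Char :=
  (PySem.List.pyRange 0 26 1).map
    (fun i => PySem.List.pyGetD pvALPHABET_UP (PySem.Int.mod (i + shift) 26) ' ')

-- out.append inside the loop; `none` = the ValueError of ALPHABET.index (excluded by Pre_).
-- The index (i + shift) % 26 is always in range, so pyGetD is exact here.
def encrypt_stage1_step (shift : Int) (acc : Option (List Char)) (ch : Char) : Option (List Char) :=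
  match acc with
  | none => none
  | some out =>
    if ch = ' ' then some (out ++ [' '])
    else
      match PySem.List.index? pvALPHABET (PySem.Chars.lowerChar ch) with
      | none => none
      | some i => some (out ++ [PySem.List.pyGetD pvALPHABET_UP (PySem.Int.mod ((i : Int) + shift) 26) ' '])

def encrypt_stage1 (msg : String) (shift : Int) : Option (List Char) :=
  msg.toList.foldl (encrypt_stage1_step shift) (some [])

def make_stage2_maps (shift : Int) : PySem.Dict Char Char × PySem.Dict Char Char :=
  let shifted := make_shifted_alphabet shift
  let reversed_shifted := shifted.reverse
  let forward := PySem.Dict.ofList ((PySem.List.pyRange 0 26 1).map (fun i =>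
      (PySem.List.pyGetD shifted i ' ', PySem.List.pyGetD reversed_shifted i ' ')))
  let backward := PySem.Dict.ofList ((PySem.List.pyRange 0 26 1).map (fun i =>
      (PySem.List.pyGetD reversed_shifted i ' ', PySem.List.pyGetD shifted i ' ')))
  (forward, backward)

-- forward[ch] is total on stage-1 output (its keys are all 26 uppercase letters), so getD is exact.
def encrypt_double (msg : String) (shift : Int) : String :=
  match encrypt_stage1 msg shift with
  | none => ""   -- unreachable under Pre_ (stage 1 raised ValueError)
  | some ct1 =>
    let forward := (make_stage2_maps shift).1
    String.mk (ct1.foldl (fun out ch =>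
      if ch = ' ' then out ++ [' '] else out ++ [forward.getD ch ' ']) [])

-- ===== PORT B =====
def pvALPHABET_B : List Char := "abcdefghijklmnopqrstuvwxyz".toList
def pvALPHABET_UP_B : List Char := PySem.Chars.upper pvALPHABET_B

def encrypt_double_alt_step (shift : Int) (acc : Option (List Char)) (ch : Char) : Option (List Char) :=
  match acc with
  | none => none
  | some out =>
    if ch = ' ' then some (out ++ [' '])
    else
      match PySem.List.index? pvALPHABET_B (PySem.Chars.lowerChar ch) with
      | none => none
      | some i => some (out ++ [PySem.List.pyGetD pvALPHABET_UP_B (PySem.Int.mod (25 - (i : Int) + shift) 26) ' '])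

def encrypt_double_alt (msg : String) (shift : Int) : String :=
  match msg.toList.foldl (encrypt_double_alt_step shift) (some []) with
  | none => ""   -- unreachable under Pre_ (ALPHABET.index raised ValueError)
  | some out => String.mk out

-- ===== PRECONDITION & SPEC =====
-- Pre_ excludes exactly the inputs where A raises ValueError: a character that is
-- neither a space nor (case-insensitively) an ASCII letter.
def Pre_encrypt_double (msg : String) (shift : Int) : Prop :=
  (msg.toList.all (fun ch => ch == ' ' || pvALPHABET.contains (PySem.Chars.lowerChar ch))) = true
instance (msg : String) (shift : Int) : Decidable (Pre_encrypt_double msg shift) := by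
  unfold Pre_encrypt_double; infer_instance

def pvWitness_encrypt_double : String × Int := ("Hello World", 3)

def Spec_encrypt_double (msg : String) (shift : Int) (out : String) : Prop := out = encrypt_double_alt msg shift
instance (msg : String) (shift : Int) (out : String) : Decidable (Spec_encrypt_double msg shift out) := by unfold Spec_encrypt_double; infer_instance

-- ===== CLAIM (what is proved, stated in full; the proofs are below) =====
def Claim_equal_encrypt_double : Prop := ∀ (msg : String) (shift : Int), Dom_encrypt_double msg shift → Pre_encrypt_double msg shift → Spec_encrypt_double msg shift (encrypt_double msg shift)

-- ===== LEMMAS AND PROOFS =====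

theorem pv_pre_chars (msg : String) (shift : Int) (h : Pre_encrypt_double msg shift) :
    ∀ ch ∈ msg.toList, ch = ' ' ∨ PySem.Chars.lowerChar ch ∈ pvALPHABET := by
  intro ch hch
  have := List.all_eq_true.mp h ch hch
  simpa using this

-- A's per-character map after stage 1 (index i of the lowered letter).
def pvF1 (shift : Int) (ch : Char) : Char :=
  if ch = ' ' then ' '
  else PySem.List.pyGetD pvALPHABET_UP
    (PySem.Int.mod (((PySem.List.index? pvALPHABET (PySem.Chars.lowerChar ch)).getD 0 : Int) + shift) 26) ' '

-- B's per-character map.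
def pvFB (shift : Int) (ch : Char) : Char :=
  if ch = ' ' then ' '
  else PySem.List.pyGetD pvALPHABET_UP_B
    (PySem.Int.mod (25 - ((PySem.List.index? pvALPHABET_B (PySem.Chars.lowerChar ch)).getD 0 : Int) + shift) 26) ' '

-- the 26×26 core fact, for reduced shifts: the forward dict sends the stage-1 letter to B's letter,
-- and stage-1 letters are never spaces.
set_option maxRecDepth 100000 in
theorem pvKey : ∀ s i : Fin 26,
    ((make_stage2_maps ((s : Nat) : Int)).1).getD
        (PySem.List.pyGetD pvALPHABET_UP (PySem.Int.mod (((i : Nat) : Int) + ((s : Nat) : Int)) 26) ' ') ' '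
      = PySem.List.pyGetD pvALPHABET_UP (PySem.Int.mod (25 - ((i : Nat) : Int) + ((s : Nat) : Int)) 26) ' '
    ∧ PySem.List.pyGetD pvALPHABET_UP (PySem.Int.mod (((i : Nat) : Int) + ((s : Nat) : Int)) 26) ' ' ≠ ' ' := by
  decide

theorem pv_mod_red (shift : Int) (j : Int) :
    PySem.Int.mod (j + shift) 26 = PySem.Int.mod (j + ((shift.emod 26).toNat : Int)) 26 := by
  rw [PySem.Int.mod_eq_emod_of_pos (by norm_num), PySem.Int.mod_eq_emod_of_pos (by norm_num)]
  have h1 : 0 ≤ shift.emod 26 := Int.emod_nonneg _ (by norm_num)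
  have h2 : shift.emod 26 < 26 := Int.emod_lt_of_pos _ (by norm_num)
  have h3 : ((shift.emod 26).toNat : Int) = shift.emod 26 := Int.toNat_of_nonneg h1
  rw [h3]
  show (j + shift) % 26 = (j + shift % 26) % 26
  omega

theorem pv_shifted_red (shift : Int) :
    make_shifted_alphabet shift = make_shifted_alphabet ((shift.emod 26).toNat : Int) := by
  unfold make_shifted_alphabet
  exact List.map_congr_left (fun i _ => by rw [pv_mod_red])

theorem pv_maps_red (shift : Int) :
    make_stage2_maps shift = make_stage2_maps ((shift.emod 26).toNat : Int) := by
  unfold make_stage2_maps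
  rw [pv_shifted_red]

-- per-letter: A's two stages compose to B's closed form, and stage-1 output is not a space.
theorem pv_char_key (shift : Int) (i : Nat) (hi : i < 26) :
    ((make_stage2_maps shift).1).getD
        (PySem.List.pyGetD pvALPHABET_UP (PySem.Int.mod ((i : Int) + shift) 26) ' ') ' '
      = PySem.List.pyGetD pvALPHABET_UP (PySem.Int.mod (25 - (i : Int) + shift) 26) ' '
    ∧ PySem.List.pyGetD pvALPHABET_UP (PySem.Int.mod ((i : Int) + shift) 26) ' ' ≠ ' ' := by
  have hs : (shift.emod 26).toNat < 26 := by
    have h1 : 0 ≤ shift.emod 26 := Int.emod_nonneg _ (by norm_num)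
    have h2 : shift.emod 26 < 26 := Int.emod_lt_of_pos _ (by norm_num)
    omega
  rw [pv_maps_red, pv_mod_red shift, pv_mod_red shift]
  exact pvKey ⟨(shift.emod 26).toNat, hs⟩ ⟨i, hi⟩

theorem pv_stage1_eq (shift : Int) (cs : List Char)
    (h : ∀ ch ∈ cs, ch = ' ' ∨ PySem.Chars.lowerChar ch ∈ pvALPHABET) (acc : List Char) :
    cs.foldl (encrypt_stage1_step shift) (some acc) = some (acc ++ cs.map (pvF1 shift)) := by
  induction cs generalizing acc with
  | nil => simp
  | cons ch cs ih =>
    have hch := h ch (by simp)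
    have htail : ∀ c ∈ cs, c = ' ' ∨ PySem.Chars.lowerChar c ∈ pvALPHABET :=
      fun c hc => h c (by simp [hc])
    rcases hch with hsp | hmem
    · subst hsp
      simp [List.foldl_cons, encrypt_stage1_step, pvF1, ih htail]
    · by_cases hsp : ch = ' '
      · subst hsp
        simp [List.foldl_cons, encrypt_stage1_step, pvF1, ih htail]
      · obtain ⟨i, hidx⟩ := (PySem.List.index?_isSome_iff (xs := pvALPHABET)
          (v := PySem.Chars.lowerChar ch)).2 hmem |> Option.isSome_iff_exists.mp
        have hidx' : List.idxOf? (PySem.Chars.lowerChar ch) pvALPHABET = some i := by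
          simpa using hidx
        simp only [List.foldl_cons, encrypt_stage1_step, if_neg hsp, hidx]
        rw [ih htail]
        simp [pvF1, if_neg hsp, hidx']

theorem pv_alt_eq (shift : Int) (cs : List Char)
    (h : ∀ ch ∈ cs, ch = ' ' ∨ PySem.Chars.lowerChar ch ∈ pvALPHABET) (acc : List Char) :
    cs.foldl (encrypt_double_alt_step shift) (some acc) = some (acc ++ cs.map (pvFB shift)) := by
  induction cs generalizing acc with
  | nil => simp
  | cons ch cs ih =>
    have hch := h ch (by simp)
    have htail : ∀ c ∈ cs, c = ' ' ∨ PySem.Chars.lowerChar c ∈ pvALPHABET :=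
      fun c hc => h c (by simp [hc])
    by_cases hsp : ch = ' '
    · subst hsp
      simp [List.foldl_cons, encrypt_double_alt_step, pvFB, ih htail]
    · have hmem : PySem.Chars.lowerChar ch ∈ pvALPHABET_B := by
        rcases hch with h' | h'
        · exact absurd h' hsp
        · exact h'
      obtain ⟨i, hidx⟩ := (PySem.List.index?_isSome_iff (xs := pvALPHABET_B)
        (v := PySem.Chars.lowerChar ch)).2 hmem |> Option.isSome_iff_exists.mp
      have hidx' : List.idxOf? (PySem.Chars.lowerChar ch) pvALPHABET_B = some i := by
        simpa using hidx
      simp only [List.foldl_cons, encrypt_double_alt_step, if_neg hsp, hidx]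
      rw [ih htail]
      simp [pvFB, if_neg hsp, hidx']

theorem pv_stage2_eq (forward : PySem.Dict Char Char) (cs : List Char) (acc : List Char) :
    cs.foldl (fun out ch => if ch = ' ' then out ++ [' '] else out ++ [forward.getD ch ' ']) acc
      = acc ++ cs.map (fun ch => if ch = ' ' then ' ' else forward.getD ch ' ') := by
  rw [show (fun (out : List Char) ch => if ch = ' ' then out ++ [' '] else out ++ [forward.getD ch ' '])
        = fun out ch => out ++ [if ch = ' ' then ' ' else forward.getD ch ' '] from
      funext fun out => funext fun ch => by split_ifs <;> rfl]
  exact PySem.List.foldl_append_singleton_eq_map _ _ _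

theorem pvAB : pvALPHABET_B = pvALPHABET := rfl
theorem pvUPB : pvALPHABET_UP_B = pvALPHABET_UP := rfl

theorem pv_index_lt (ch : Char) (i : Nat)
    (h : PySem.List.index? pvALPHABET (PySem.Chars.lowerChar ch) = some i) : i < 26 := by
  obtain ⟨hk, -, -⟩ := PySem.List.getElem_of_index?_eq_some h
  simpa [pvALPHABET] using hk

-- ===== VERDICT (by name: the statement is the Claim_ definition above) =====
theorem encrypt_double_spec : Claim_equal_encrypt_double := by
  intro msg shift _ hpre0
  have hpre := pv_pre_chars msg shift hpre0
  unfold Spec_encrypt_double encrypt_double encrypt_double_alt encrypt_stage1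
  rw [pv_stage1_eq shift msg.toList hpre [], pv_alt_eq shift msg.toList hpre []]
  simp only [List.nil_append]
  rw [pv_stage2_eq, List.nil_append]
  refine congrArg String.mk ?_
  rw [List.map_map]
  refine List.map_congr_left (fun ch hch => ?_)
  rcases hpre ch hch with hsp | hmem
  · subst hsp; simp [pvF1, pvFB]
  · by_cases hsp : ch = ' '
    · subst hsp; simp [pvF1, pvFB]
    · obtain ⟨i, hidx⟩ := (PySem.List.index?_isSome_iff (xs := pvALPHABET)
        (v := PySem.Chars.lowerChar ch)).2 hmem |> Option.isSome_iff_exists.mp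
      have hi := pv_index_lt ch i hidx
      obtain ⟨hkey, hne⟩ := pv_char_key shift i hi
      have hidxB : PySem.List.index? pvALPHABET_B (PySem.Chars.lowerChar ch) = some i := by
        rw [pvAB]; exact hidx
      have hF1 : pvF1 shift ch
          = PySem.List.pyGetD pvALPHABET_UP (PySem.Int.mod ((i : Int) + shift) 26) ' ' := by
        simp only [pvF1, if_neg hsp, hidx, Option.getD_some]
      have hFB : pvFB shift ch
          = PySem.List.pyGetD pvALPHABET_UP (PySem.Int.mod (25 - (i : Int) + shift) 26) ' ' := by
        simp only [pvFB, if_neg hsp, hidxB, Option.getD_some, pvUPB]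
      simp only [Function.comp_apply, hF1, hFB, if_neg hne]
      exact hkey
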